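-- pv_equiv track=rewrite | github.com/istiak29/algorithm-code | Assignment/A_4/task_6.py | max_diamond_find
-- ===== SOURCE A (Python) =====
-- def dfs(jumanji_map, row, col, visited):
--     if row < 0 or row >= len(jumanji_map) or col < 0 or col >= len(jumanji_map[0]) or jumanji_map[row][col] == '#' or visited[row][col]:
--         return 0
--
--     visited[row][col] = True
--     collected_diamonds = 0
--
--     if jumanji_map[row][col] == 'D':
--         collected_diamonds = 1
--
--     # Explore all four directions (up, down, left, right) from the current cell
--     collected_diamonds += dfs(jumanji_map, row + 1, col, visited)
--     collected_diamonds += dfs(jumanji_map, row - 1, col, visited)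
--     collected_diamonds += dfs(jumanji_map, row, col + 1, visited)
--     collected_diamonds += dfs(jumanji_map, row, col - 1, visited)
--
--     return collected_diamonds
--
-- def max_diamond_find(jumanji_map):
--     max_diamonds_collection = 0
--     rows, cols = len(jumanji_map), len(jumanji_map[0])
--
--     for i in range(rows):
--         for j in range(cols):
--             if jumanji_map[i][j] == '.':
--                 visited = [[False for _ in range(cols)] for _ in range(rows)]
--                 max_diamonds_collection = max(max_diamonds_collection, dfs(jumanji_map, i, j, visited))
--
--     return max_diamonds_collection
-- ===== SOURCE B (Python) =====
-- def max_diamond_find(jumanji_map):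
--     rows, cols = len(jumanji_map), len(jumanji_map[0])
--     best = 0
--     for i in range(rows):
--         for j in range(cols):
--             if jumanji_map[i][j] == '.':
--                 visited = [[False] * cols for _ in range(rows)]
--                 total = 0
--                 stack = [(i, j)]
--                 while stack:
--                     r, c = stack.pop()
--                     if r < 0 or r >= rows or c < 0 or c >= cols or jumanji_map[r][c] == '#' or visited[r][c]:
--                         continue
--                     visited[r][c] = True
--                     if jumanji_map[r][c] == 'D':
--                         total += 1
--                     stack.extend(((r, c - 1), (r, c + 1), (r - 1, c), (r + 1, c)))
--                 best = max(best, total)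
--     return best
-- ===== Notes on version B (the rewrite author's own statement) =====
-- stated objective: alternative
-- what changed: The recursive four-way DFS with a mutable visited matrix is replaced by an iterative explicit-stack flood fill accumulating the diamond count, avoiding Python recursion (and its depth limit) entirely.
import Mathlib
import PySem

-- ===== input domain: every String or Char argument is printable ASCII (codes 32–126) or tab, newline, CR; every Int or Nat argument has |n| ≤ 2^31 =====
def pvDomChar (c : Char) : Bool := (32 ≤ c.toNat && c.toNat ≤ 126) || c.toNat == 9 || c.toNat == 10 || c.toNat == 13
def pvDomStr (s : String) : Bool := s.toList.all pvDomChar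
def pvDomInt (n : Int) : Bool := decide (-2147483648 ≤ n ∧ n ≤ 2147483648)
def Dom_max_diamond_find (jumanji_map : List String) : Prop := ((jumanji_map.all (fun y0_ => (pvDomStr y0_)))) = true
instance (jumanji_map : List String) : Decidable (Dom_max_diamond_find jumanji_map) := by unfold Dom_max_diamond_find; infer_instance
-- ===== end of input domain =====

-- B replaces A's recursive four-way DFS (fresh visited matrix per '.' start) by an iterative
-- explicit-stack flood fill accumulating the diamond count; same asymptotic cost ("alternative").

-- ===== PORT A =====
-- shared grid helpers (used by both ports; exact on inputs satisfying Pre_)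
def pvRows (m : List String) : Int := (m.length : Int)
-- cols = len(jumanji_map[0]); m[0] modeled by headD (Pre_ excludes the empty map, where Python raises)
def pvCols (m : List String) : Int := PySem.Str.len (m.headD "")
-- jumanji_map[r][c]: only evaluated after the guards 0 ≤ r < rows, 0 ≤ c < cols, where with Pre_
-- (every row length ≥ cols) it is exact; the ' ' default is never produced under Pre_.
def pvCell (m : List String) (r c : Int) : Char :=
  ((PySem.List.pyGet? m r).bind (fun s => PySem.Str.pyGet? s c)).getD ' '
-- visited[r][c] lookup / visited[r][c] = True (indices already guarded nonnegative)
def vget? (v : List (List Bool)) (r c : Int) : Option Bool :=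
  (v[r.toNat]?).bind (fun rw => rw[c.toNat]?)
def vset (v : List (List Bool)) (r c : Int) : List (List Bool) :=
  v.modify r.toNat (fun rw => rw.set c.toNat true)
-- number of unvisited entries (fuel measure for the ports' recursions; a port artifact, not in the Python)
def countFalse (v : List (List Bool)) : Nat := (v.map (fun rw => rw.count false)).sum
-- visited = [[False]*cols for _ in range(rows)]
def freshV (m : List String) : List (List Bool) :=
  List.replicate m.length (List.replicate (pvCols m).toNat false)

-- recursive dfs of A; the Python 'or visited[row][col]' is the (dite) test on vget? (lookup is
-- Option-valued; in every actual call visited has full rows×cols shape, so 'some false' = unvisited)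
def dfsA (m : List String) (fuel : Nat) (r c : Int) (v : List (List Bool)) :
    Int × List (List Bool) :=
  match fuel with
  | 0 => (0, v)
  | fuel + 1 =>
    if r < 0 ∨ pvRows m ≤ r ∨ c < 0 ∨ pvCols m ≤ c ∨ pvCell m r c = '#' then (0, v)
    else if vget? v r c = some false then
      let v1 := vset v r c
      let d0 : Int := if pvCell m r c = 'D' then 1 else 0
      let p1 := dfsA m fuel (r + 1) c v1
      let p2 := dfsA m fuel (r - 1) c p1.2
      let p3 := dfsA m fuel r (c + 1) p2.2
      let p4 := dfsA m fuel r (c - 1) p3.2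
      (d0 + p1.1 + p2.1 + p3.1 + p4.1, p4.2)
    else (0, v)

def max_diamond_find (jumanji_map : List String) : Int :=
  (PySem.List.pyRange 0 (pvRows jumanji_map) 1).foldl (fun best i =>
    (PySem.List.pyRange 0 (pvCols jumanji_map) 1).foldl (fun best j =>
      if pvCell jumanji_map i j = '.' then
        max best (dfsA jumanji_map (countFalse (freshV jumanji_map) + 1) i j
                    (freshV jumanji_map)).1
      else best) best) 0

-- ===== PORT B =====
-- B's while-loop: stack top = Python list end; pop, skip or mark+count, push the four neighbours
theorem countFalse_vset_aux :
    ∀ (v : List (List Bool)) (n k : Nat),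
      ((v[n]?).bind (fun rw => rw[k]?)) = some false →
      countFalse (v.modify n (fun rw => rw.set k true)) + 1 = countFalse v := by
  intro v
  induction v with
  | nil => intro n k h; simp at h
  | cons rw v' ih =>
    intro n k h
    cases n with
    | zero =>
      simp at h
      have hrow : ∀ (rw : List Bool) (k : Nat), rw[k]? = some false →
          (rw.set k true).count false + 1 = rw.count false := by
        intro rw
        induction rw with
        | nil => intro k h; simp at h
        | cons b bs ihb =>
          intro k h
          cases k with
          | zero => simp at h; subst h; simp
          | succ k =>
            simp at h
            have := ihb k h
            simp [List.count_cons]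
            omega
      simp [List.modify, countFalse]
      have := hrow rw k h
      omega
    | succ n =>
      simp at h
      have := ih n k h
      simp [List.modify, countFalse] at this ⊢
      omega

theorem countFalse_vset {v : List (List Bool)} {r c : Int}
    (h : vget? v r c = some false) :
    countFalse (vset v r c) + 1 = countFalse v :=
  countFalse_vset_aux v r.toNat c.toNat h

def floodB (m : List String) (stack : List (Int × Int)) (v : List (List Bool))
    (total : Int) : Int :=
  match stack with
  | [] => total
  | (r, c) :: rest =>
    if r < 0 ∨ pvRows m ≤ r ∨ c < 0 ∨ pvCols m ≤ c ∨ pvCell m r c = '#' then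
      floodB m rest v total
    else if h : vget? v r c = some false then
      floodB m ((r + 1, c) :: (r - 1, c) :: (r, c + 1) :: (r, c - 1) :: rest)
        (vset v r c) (total + (if pvCell m r c = 'D' then 1 else 0))
    else floodB m rest v total
termination_by 4 * countFalse v + stack.length
decreasing_by
  all_goals simp
  all_goals (have := countFalse_vset h; omega)

def max_diamond_find_alt (jumanji_map : List String) : Int :=
  (PySem.List.pyRange 0 (pvRows jumanji_map) 1).foldl (fun best i =>
    (PySem.List.pyRange 0 (pvCols jumanji_map) 1).foldl (fun best j =>
      if pvCell jumanji_map i j = '.' then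
        max best (floodB jumanji_map [(i, j)] (freshV jumanji_map) 0)
      else best) best) 0

-- ===== PRECONDITION & SPEC =====
-- Pre_ excludes exactly the inputs where Python A raises: the empty map (len(jumanji_map[0]) is an
-- IndexError) and maps with a row shorter than row 0 (the scan jumanji_map[i][j], j < cols, raises).
def Pre_max_diamond_find (jumanji_map : List String) : Prop :=
  jumanji_map ≠ [] ∧ ∀ s ∈ jumanji_map, pvCols jumanji_map ≤ PySem.Str.len s
instance (jumanji_map : List String) : Decidable (Pre_max_diamond_find jumanji_map) := by
  unfold Pre_max_diamond_find; infer_instance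
def pvWitness_max_diamond_find : List String := [".D#", "D.."]
def Spec_max_diamond_find (jumanji_map : List String) (out : Int) : Prop :=
  out = max_diamond_find_alt jumanji_map
instance (jumanji_map : List String) (out : Int) : Decidable (Spec_max_diamond_find jumanji_map out) := by
  unfold Spec_max_diamond_find; infer_instance

-- ===== CLAIM =====
def Claim_equal_max_diamond_find : Prop := ∀ (jumanji_map : List String), Dom_max_diamond_find jumanji_map → Pre_max_diamond_find jumanji_map → Spec_max_diamond_find jumanji_map (max_diamond_find jumanji_map)

-- ===== LEMMAS AND PROOFS =====

theorem dfsA_mono (m : List String) :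
    ∀ (fuel : Nat) (r c : Int) (v : List (List Bool)),
      countFalse (dfsA m fuel r c v).2 ≤ countFalse v := by
  intro fuel
  induction fuel with
  | zero => intro r c v; simp [dfsA]
  | succ fuel ih =>
    intro r c v
    by_cases hg : r < 0 ∨ pvRows m ≤ r ∨ c < 0 ∨ pvCols m ≤ c ∨ pvCell m r c = '#'
    · rw [dfsA, if_pos hg]
    · by_cases h : vget? v r c = some false
      · rw [dfsA, if_neg hg, if_pos h]
        have h1 := countFalse_vset h
        have h2 := ih (r + 1) c (vset v r c)
        have h3 := ih (r - 1) c (dfsA m fuel (r + 1) c (vset v r c)).2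
        have h4 := ih r (c + 1)
          (dfsA m fuel (r - 1) c (dfsA m fuel (r + 1) c (vset v r c)).2).2
        have h5 := ih r (c - 1)
          (dfsA m fuel r (c + 1) (dfsA m fuel (r - 1) c (dfsA m fuel (r + 1) c (vset v r c)).2).2).2
        dsimp only
        omega
      · rw [dfsA, if_neg hg, if_neg h]

theorem sim (m : List String) :
    ∀ (n : Nat) (v : List (List Bool)), countFalse v ≤ n →
    ∀ (fa : Nat), countFalse v < fa →
    ∀ (r c : Int) (rest : List (Int × Int)) (total : Int),
      floodB m ((r, c) :: rest) v total
        = floodB m rest (dfsA m fa r c v).2 (total + (dfsA m fa r c v).1) := by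
  intro n
  induction n with
  | zero =>
    intro v hv fa hfa r c rest total
    obtain ⟨f, rfl⟩ : ∃ f, fa = f + 1 := ⟨fa - 1, by omega⟩
    have hne : ¬ vget? v r c = some false := by
      intro h
      have := countFalse_vset h
      omega
    by_cases hg : r < 0 ∨ pvRows m ≤ r ∨ c < 0 ∨ pvCols m ≤ c ∨ pvCell m r c = '#'
    · rw [floodB, dfsA, if_pos hg, if_pos hg]
      dsimp only
      congr 1
      omega
    · rw [floodB, dfsA, if_neg hg, if_neg hg, dif_neg hne, if_neg hne]
      dsimp only
      congr 1
      omega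
  | succ n ih =>
    intro v hv fa hfa r c rest total
    obtain ⟨f, rfl⟩ : ∃ f, fa = f + 1 := ⟨fa - 1, by omega⟩
    by_cases hg : r < 0 ∨ pvRows m ≤ r ∨ c < 0 ∨ pvCols m ≤ c ∨ pvCell m r c = '#'
    · rw [floodB, dfsA, if_pos hg, if_pos hg]
      dsimp only
      congr 1
      omega
    · by_cases h : vget? v r c = some false
      · have hc := countFalse_vset h
        have m1 := dfsA_mono m f (r + 1) c (vset v r c)
        have m2 := dfsA_mono m f (r - 1) c (dfsA m f (r + 1) c (vset v r c)).2
        have m3 := dfsA_mono m f r (c + 1)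
          (dfsA m f (r - 1) c (dfsA m f (r + 1) c (vset v r c)).2).2
        rw [floodB, dfsA, if_neg hg, if_neg hg, dif_pos h, if_pos h]
        dsimp only
        rw [ih (vset v r c) (by omega) f (by omega)]
        rw [ih _ (by omega) f (by omega)]
        rw [ih _ (by omega) f (by omega)]
        rw [ih _ (by omega) f (by omega)]
        congr 1
        omega
      · rw [floodB, dfsA, if_neg hg, if_neg hg, dif_neg h, if_neg h]
        dsimp only
        congr 1
        omega

theorem cell_eq (m : List String) (i j : Int) :
    (dfsA m (countFalse (freshV m) + 1) i j (freshV m)).1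
      = floodB m [(i, j)] (freshV m) 0 := by
  rw [sim m (countFalse (freshV m)) (freshV m) le_rfl (countFalse (freshV m) + 1) (by omega)]
  rw [floodB]
  omega

-- ===== VERDICT =====
theorem max_diamond_find_spec : Claim_equal_max_diamond_find := by
  intro m _ _
  unfold Spec_max_diamond_find max_diamond_find max_diamond_find_alt
  simp only [cell_eq]
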